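-- pv_equiv track=rewrite | github.com/pypi-data/pypi-mirror-400 | packages/niamkeltd-pylib/niamkeltd_pylib-1.0.11.tar.gz/niamkeltd_pylib-1.0.11/niamkeltd_pylib/helpers/messagehelper.py | trim_and_close_html_tags
-- ===== SOURCE A (Python) =====
-- def trim_and_close_html_tags(s: str, max_length: int) -> str:
--     """Trim a string to max_length, ensuring HTML tags like <i> and <b> are properly closed."""
--     trimmed = s[:max_length]
--     open_tags = []
--
--     # Parse and track unclosed tags
--     i = 0
--     while i < len(trimmed):
--         if trimmed[i] == "<":
--             # Look for opening or closing tags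
--             end = trimmed.find(">", i)
--             if end == -1:
--                 break  # Malformed tag, exit parsing
--             tag = trimmed[i + 1:end].strip()
--             if not tag.startswith("/"):  # Opening tag
--                 open_tags.append(tag)
--             elif open_tags and open_tags[-1] == tag[1:]:  # Closing tag
--                 open_tags.pop()
--             i = end
--         i += 1
--
--     # Append closing tags for any unclosed tags
--     for tag in reversed(open_tags):
--         trimmed += f"</{tag}>"
--
--     return trimmed
-- ===== SOURCE B (Python) =====
-- def trim_and_close_html_tags(s: str, max_length: int) -> str:
--     """Trim a string to max_length, ensuring HTML tags like <i> and <b> are properly closed."""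
--     trimmed = s[:max_length]
--
--     # Pass 1: tokenize the trimmed text into the list of tag contents, consuming a suffix.
--     contents = []
--     rest = trimmed
--     while rest:
--         if rest[0] == "<":
--             body, sep, after = rest[1:].partition(">")
--             if not sep:
--                 break  # no closing '>': stop tokenizing
--             contents.append(body.strip())
--             rest = after
--         else:
--             rest = rest[1:]
--
--     # Pass 2: run the tag stack over the token list.
--     stack = []
--     for tag in contents:
--         if not tag.startswith("/"):
--             stack.append(tag)
--         elif stack and stack[-1] == tag[1:]:
--             stack.pop()
--
--     # Close whatever remains open, innermost first.
--     return trimmed + "".join(f"</{t}>" for t in reversed(stack))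
-- ===== Notes on version B (the rewrite author's own statement) =====
-- stated objective: alternative
-- what changed: B replaces A's single index-driven while loop (find('>', i) plus index jumping) by a two-pass decomposition: a tokenizer that consumes the string as a shrinking suffix via partition('>') to collect all tag contents, then a separate stack fold over that token list, with the closers produced by one join instead of repeated concatenation.
import Mathlib
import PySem

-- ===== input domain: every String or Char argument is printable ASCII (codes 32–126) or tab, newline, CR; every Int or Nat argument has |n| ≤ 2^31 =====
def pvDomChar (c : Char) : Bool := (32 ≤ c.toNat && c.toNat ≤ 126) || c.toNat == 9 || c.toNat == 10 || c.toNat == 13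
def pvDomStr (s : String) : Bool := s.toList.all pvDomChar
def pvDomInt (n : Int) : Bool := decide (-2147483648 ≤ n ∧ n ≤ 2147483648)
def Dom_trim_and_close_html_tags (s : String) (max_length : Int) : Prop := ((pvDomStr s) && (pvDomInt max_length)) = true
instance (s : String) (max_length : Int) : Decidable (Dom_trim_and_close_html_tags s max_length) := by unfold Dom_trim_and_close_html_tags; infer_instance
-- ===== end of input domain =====

-- B replaces A's single index-driven scan by a two-pass decomposition (tokenize all tag
-- contents by suffix consumption, then fold a stack over the token list); same result,
-- an "alternative" structure (not faster).

-- ===== PORT A =====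
-- A's while loop over the index i.  open_tags is kept top-first (the list head is Python's
-- open_tags[-1]), so Python's append/pop at the end become cons/tail at the head and
-- 'reversed(open_tags)' is the stored list read in order.
def pvLoopA (cs : List Char) (i : Nat) (tags : List (List Char)) : List (List Char) :=
  if h : i < cs.length then
    if cs[i] = '<' then
      -- end = trimmed.find(">", i)
      have e := PySem.Chars.findFrom cs ['>'] (i : Int)
      if he : e = -1 then tags            -- break: return the tags collected so far
      else
        -- tag = trimmed[i + 1:end].strip()
        have tag := PySem.Chars.strip (PySem.List.slice cs (some ((i : Int) + 1)) (some e))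
        have tags' :=
          if ¬ PySem.Chars.startswith tag ['/'] then tag :: tags
          else match tags with
            | [] => ([] : List (List Char))
            | top :: rest =>
              if top = PySem.List.slice tag (some 1) none then rest else top :: rest
        -- i = end; i += 1
        pvLoopA cs (e.toNat + 1) tags'
    else pvLoopA cs (i + 1) tags
  else tags
termination_by cs.length - i
decreasing_by
  · have hk : i ≤ cs.length := Nat.le_of_lt h
    have hspec := (PySem.Chars.findFrom_natCast_spec cs ['>'] i hk he).1
    omega
  · omega

-- trimmed = s[:max_length]; then the while loop from i = 0 on an empty stack, and finally
-- for tag in reversed(open_tags): trimmed += f"</{tag}>"  (a foldl of appends over the stack)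
def trim_and_close_html_tags (s : String) (max_length : Int) : String :=
  String.ofList
    ((pvLoopA (PySem.Str.slice s none (some max_length)).toList 0 []).foldl
      (fun acc t => acc ++ ('<' :: '/' :: (t ++ ['>'])))
      (PySem.Str.slice s none (some max_length)).toList)

-- ===== PORT B =====
-- rest[1:].partition(">") ported by hand: the chars before the first '>' and the chars after
-- it, or none when no '>' exists (exact on every list).
def pvSplitGt : List Char → Option (List Char × List Char)
  | [] => none
  | c :: rest =>
    if c = '>' then some ([], rest)
    else match pvSplitGt rest with
      | none => none
      | some (b, a) => some (c :: b, a)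

-- needed by pvTokenize's termination
theorem pvSplitGt_shrinks : ∀ (xs b a : List Char), pvSplitGt xs = some (b, a) → a.length < xs.length := by
  intro xs
  induction xs with
  | nil => intro b a h; simp [pvSplitGt] at h
  | cons c rest ih =>
    intro b a h
    by_cases hc : c = '>'
    · simp [pvSplitGt, hc] at h
      simp [← h.2]
    · simp only [pvSplitGt, if_neg hc] at h
      cases hsp : pvSplitGt rest with
      | none => rw [hsp] at h; simp at h
      | some p =>
        rw [hsp] at h
        simp at h
        have := ih p.1 p.2 (by rw [hsp])
        simp [← h.2]
        omega

-- Pass 1 of Source B: the while loop consuming the suffix 'rest', collecting tag contents.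
def pvTokenize (xs : List Char) : List (List Char) :=
  match xs with
  | [] => []
  | c :: rest =>
    if c = '<' then
      match hsp : pvSplitGt rest with
      | none => []                         -- no '>' : break
      | some (b, a) => PySem.Chars.strip b :: pvTokenize a
    else pvTokenize rest
termination_by xs.length
decreasing_by
  · have := pvSplitGt_shrinks rest b a hsp
    simp; omega
  · simp

-- Pass 2 of Source B: one step of the stack loop (stack kept top-first, as in port A).
def pvStep (tags : List (List Char)) (tag : List Char) : List (List Char) :=
  if ¬ PySem.Chars.startswith tag ['/'] then tag :: tags
  else match tags with
    | [] => ([] : List (List Char))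
    | top :: rest =>
      if top = PySem.List.slice tag (some 1) none then rest else top :: rest

-- trimmed = s[:max_length]; tokenize it, fold the stack over the tokens, and return
-- trimmed + "".join(f"</{t}>" for t in reversed(stack))
def trim_and_close_html_tags_alt (s : String) (max_length : Int) : String :=
  String.ofList
    ((PySem.Str.slice s none (some max_length)).toList ++
      PySem.Chars.join []
        (((pvTokenize (PySem.Str.slice s none (some max_length)).toList).foldl pvStep []).map
          (fun t => '<' :: '/' :: (t ++ ['>']))))

-- ===== PRECONDITION & SPEC =====
def Spec_trim_and_close_html_tags (s : String) (max_length : Int) (out : String) : Prop := out = trim_and_close_html_tags_alt s max_length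
instance (s : String) (max_length : Int) (out : String) : Decidable (Spec_trim_and_close_html_tags s max_length out) := by unfold Spec_trim_and_close_html_tags; infer_instance

-- ===== CLAIM (what is proved, stated in full; the proofs are below) =====
def Claim_equal_trim_and_close_html_tags : Prop := ∀ (s : String) (max_length : Int), Dom_trim_and_close_html_tags s max_length → Spec_trim_and_close_html_tags s max_length (trim_and_close_html_tags s max_length)

-- ===== LEMMAS AND PROOFS =====

theorem pvSplitGt_none {xs : List Char} (h : pvSplitGt xs = none) : '>' ∉ xs := by
  induction xs with
  | nil => simp
  | cons c rest ih =>
    by_cases hc : c = '>'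
    · simp [pvSplitGt, hc] at h
    · simp only [pvSplitGt, if_neg hc] at h
      cases hsp : pvSplitGt rest with
      | none =>
        simp only [List.mem_cons, not_or]
        exact ⟨fun hcc => hc hcc.symm, ih hsp⟩
      | some p => rw [hsp] at h; simp at h

theorem pvSplitGt_some {xs b a : List Char} (h : pvSplitGt xs = some (b, a)) :
    xs = b ++ '>' :: a ∧ '>' ∉ b := by
  induction xs generalizing b a with
  | nil => simp [pvSplitGt] at h
  | cons c rest ih =>
    by_cases hc : c = '>'
    · simp [pvSplitGt, hc] at h
      simp [hc, h.1, h.2]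
    · simp only [pvSplitGt, if_neg hc] at h
      cases hsp : pvSplitGt rest with
      | none => rw [hsp] at h; simp at h
      | some p =>
        rw [hsp] at h
        simp at h
        obtain ⟨hb, ha⟩ := h
        obtain ⟨hx, hnb⟩ := ih (b := p.1) (a := p.2) (by rw [hsp])
        subst ha
        constructor
        · rw [← hb]; simp [hx]
        · rw [← hb]; simp [hnb]; exact fun hcc => hc hcc.symm

theorem singleton_prefix_iff (c : Char) (l : List Char) : [c] <+: l ↔ l.head? = some c := by
  cases l with
  | nil => simp
  | cons x t =>
    constructor
    · intro ⟨r, hr⟩; simp at hr; simp [hr.1]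
    · intro h; simp at h; exact ⟨t, by simp [h]⟩

theorem singleton_infix_iff (c : Char) (l : List Char) : [c] <:+: l ↔ c ∈ l := by
  constructor
  · intro h; have := h.sublist; simpa using this
  · intro h
    obtain ⟨p, q, hpq⟩ := List.append_of_mem h
    exact ⟨p, q, by simp [hpq]⟩

-- first occurrence of '>' in p ++ '>' :: a with '>' ∉ p is at p.length
theorem find_gt_eq (p a : List Char) (hp : '>' ∉ p) :
    PySem.Chars.find (p ++ '>' :: a) ['>'] = (p.length : Int) := by
  have hinf : ['>'] <:+: (p ++ '>' :: a) := by
    rw [singleton_infix_iff]; simp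
  have hne : PySem.Chars.find (p ++ '>' :: a) ['>'] ≠ -1 := by
    intro hcontra
    exact (PySem.Chars.find_eq_neg_one_iff _ _).mp hcontra hinf
  have h0 : (0 : Nat) ≤ (p ++ '>' :: a).length := Nat.zero_le _
  have hff : PySem.Chars.findFrom (p ++ '>' :: a) ['>'] ((0 : Nat) : Int) =
      PySem.Chars.find (p ++ '>' :: a) ['>'] := by
    simpa using PySem.Chars.findFrom_zero (p ++ '>' :: a) ['>']
  have hne' : PySem.Chars.findFrom (p ++ '>' :: a) ['>'] ((0 : Nat) : Int) ≠ -1 := by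
    rw [hff]; exact hne
  obtain ⟨hle, hpre, hmin⟩ := PySem.Chars.findFrom_natCast_spec (p ++ '>' :: a) ['>'] 0 h0 hne'
  rw [hff] at hle hpre hmin
  set f := PySem.Chars.find (p ++ '>' :: a) ['>'] with hf
  have hj : f.toNat = p.length := by
    rcases Nat.lt_trichotomy f.toNat p.length with hlt | heq | hgt
    · exfalso
      rw [singleton_prefix_iff] at hpre
      have hget : (p ++ '>' :: a)[f.toNat]? = some '>' := by
        rw [← List.head?_drop]; exact hpre
      rw [List.getElem?_append_left hlt] at hget
      exact hp (List.mem_of_getElem? hget)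
    · exact heq
    · exfalso
      apply hmin p.length (Nat.zero_le _) hgt
      rw [singleton_prefix_iff, List.head?_drop]
      simp
  omega

theorem join_nil_eq_flatten (ps : List (List Char)) : PySem.Chars.join [] ps = ps.flatten := by
  induction ps with
  | nil => simp [PySem.Chars.join_nil]
  | cons x t ih =>
    cases t with
    | nil => simp [PySem.Chars.join_singleton]
    | cons y r => rw [PySem.Chars.join_cons_cons]; simp [ih]

-- the crux: A's index loop from i computes the stack fold of B's tokenization of the suffix
theorem pvLoopA_eq_fold (n : Nat) : ∀ (cs : List Char) (i : Nat) (tags : List (List Char)),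
    cs.length - i ≤ n → pvLoopA cs i tags = (pvTokenize (cs.drop i)).foldl pvStep tags := by
  induction n with
  | zero =>
    intro cs i tags hn
    have hge : ¬ i < cs.length := by omega
    rw [pvLoopA, dif_neg hge, List.drop_eq_nil_of_le (by omega), pvTokenize]
    rfl
  | succ n ih =>
    intro cs i tags hn
    by_cases h : i < cs.length
    · have hdrop : cs.drop i = cs[i] :: cs.drop (i + 1) := List.drop_eq_getElem_cons h
      by_cases hc : cs[i] = '<'
      · cases hsp : pvSplitGt (cs.drop (i + 1)) with
        | none =>
          have hmem : '>' ∉ cs.drop i := by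
            rw [hdrop]
            simp [hc, pvSplitGt_none hsp]
          have hfind : PySem.Chars.find (cs.drop i) ['>'] = -1 := by
            rw [PySem.Chars.find_eq_neg_one_iff, singleton_infix_iff]; exact hmem
          have he : PySem.Chars.findFrom cs ['>'] (i : Int) = -1 := by
            rw [PySem.Chars.findFrom_natCast cs ['>'] i (Nat.le_of_lt h), hfind]; simp
          rw [pvLoopA, dif_pos h, if_pos hc, dif_pos he, hdrop, pvTokenize, if_pos hc, hsp]
          simp [List.foldl]
        | some p =>
          obtain ⟨b, a⟩ := p
          obtain ⟨hx, hnb⟩ := pvSplitGt_some hsp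
          have hdrop' : cs.drop i = ('<' :: b) ++ '>' :: a := by rw [hdrop, hx, hc]; simp
          have hnb' : '>' ∉ '<' :: b := by simp [hnb]
          have hfind : PySem.Chars.find (cs.drop i) ['>'] = ((b.length + 1 : Nat) : Int) := by
            rw [hdrop', find_gt_eq _ _ hnb']; simp
          have he : PySem.Chars.findFrom cs ['>'] (i : Int) = ((i + b.length + 1 : Nat) : Int) := by
            rw [PySem.Chars.findFrom_natCast cs ['>'] i (Nat.le_of_lt h), hfind,
              if_neg (by omega : ¬((b.length + 1 : Nat) : Int) = -1)]
            push_cast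
            ring_nf
          have hene : PySem.Chars.findFrom cs ['>'] (i : Int) ≠ -1 := by rw [he]; omega
          have hslice : PySem.List.slice cs (some ((i : Int) + 1)) (some (PySem.Chars.findFrom cs ['>'] (i : Int))) = b := by
            rw [he]
            have h1 : ((i : Int) + 1) = ((i + 1 : Nat) : Int) := by push_cast; ring
            rw [h1, PySem.List.slice_natCast]
            have : cs.drop (i + 1) = b ++ '>' :: a := hx
            rw [this]
            have hlen : i + b.length + 1 - (i + 1) = b.length := by omega
            rw [hlen, List.take_left' rfl]
          have hdropa : cs.drop (PySem.Chars.findFrom cs ['>'] (i : Int)).toNat.succ = a := by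
            rw [he]
            have : ((i + b.length + 1 : Nat) : Int).toNat = i + b.length + 1 := by omega
            rw [this]
            have h2 : (i + b.length + 1).succ = (i + 1) + (b.length + 1) := by omega
            rw [h2, ← List.drop_drop, hx]
            have : b ++ '>' :: a = (b ++ ['>']) ++ a := by simp
            rw [this]
            have h3 : b.length + 1 = (b ++ ['>']).length := by simp
            rw [h3, List.drop_left]
          rw [pvLoopA, dif_pos h, if_pos hc, dif_neg hene, hdrop, pvTokenize, if_pos hc, hsp]
          simp only [List.foldl]
          rw [hslice]
          have harec : (PySem.Chars.findFrom cs ['>'] (i : Int)).toNat + 1 = (PySem.Chars.findFrom cs ['>'] (i : Int)).toNat.succ := rfl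
          rw [harec, ih cs _ _ (by rw [he] at *; omega), hdropa]
          rfl
      · rw [pvLoopA, dif_pos h, if_neg hc, hdrop, pvTokenize, if_neg hc]
        exact ih cs (i + 1) tags (by omega)
    · rw [pvLoopA, dif_neg h, List.drop_eq_nil_of_le (by omega), pvTokenize]
      rfl

-- ===== VERDICT (by name: the statement is the Claim_ definition above) =====
theorem trim_and_close_html_tags_spec : Claim_equal_trim_and_close_html_tags := by
  intro s max_length _
  unfold Spec_trim_and_close_html_tags trim_and_close_html_tags trim_and_close_html_tags_alt
  rw [pvLoopA_eq_fold ((PySem.Str.slice s none (some max_length)).toList.length) _ 0 [] (by omega)]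
  rw [List.drop_zero, PySem.List.foldl_append_eq_flatMap, join_nil_eq_flatten]
  simp [List.flatMap_def]
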